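-- pv_equiv track=rewrite | github.com/aravind-dd-11556/cowork-local | cowork_agent/tools/notebook_edit.py | _to_source_lines
-- ===== SOURCE A (Python) =====
-- def _to_source_lines(source: str) -> list[str]:
--     """Convert a string to ipynb source format (list of lines with newlines)."""
--     if not source:
--         return []
--     lines = source.split("\n")
--     # Add newline to all lines except the last
--     result = [line + "\n" for line in lines[:-1]]
--     if lines[-1]:  # Don't add empty string for trailing newline
--         result.append(lines[-1])
--     return result
-- ===== SOURCE B (Python) =====
-- def _to_source_lines(source: str) -> list[str]:
--     """Single pass over the characters: flush the buffer at each newline,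
--     then once more at the end if anything is left."""
--     result = []
--     buf = []
--     for ch in source:
--         buf.append(ch)
--         if ch == "\n":
--             result.append("".join(buf))
--             buf = []
--     if buf:
--         result.append("".join(buf))
--     return result
-- ===== Notes on version B (the rewrite author's own statement) =====
-- stated objective: alternative
-- what changed: B replaces split-on-newline plus reattaching '\n' to all but the last piece (with a special case for a trailing newline) by a single character-scan that flushes an accumulator buffer at each newline and once at the end; no split, no slice, no last-element conditional.
import Mathlib
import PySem

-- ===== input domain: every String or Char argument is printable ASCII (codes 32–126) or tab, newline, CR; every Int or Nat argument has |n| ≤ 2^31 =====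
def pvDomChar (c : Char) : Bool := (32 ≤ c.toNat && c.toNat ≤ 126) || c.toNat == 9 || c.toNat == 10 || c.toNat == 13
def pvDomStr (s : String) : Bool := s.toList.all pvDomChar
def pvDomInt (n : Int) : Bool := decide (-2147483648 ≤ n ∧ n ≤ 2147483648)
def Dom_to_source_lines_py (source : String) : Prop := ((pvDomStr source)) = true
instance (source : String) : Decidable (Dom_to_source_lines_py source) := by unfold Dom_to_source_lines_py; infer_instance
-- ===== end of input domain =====

-- B replaces split-on-'\n' plus reattaching newlines (with a last-element special case)
-- by a single character-scan flushing an accumulator buffer; objective: alternative (same cost).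

-- ===== PORT A =====
-- Port of A (strings handled as List Char, String.ofList applied once at the end).
def to_source_lines_py (source : String) : List String :=
  let cs := source.toList
  if cs.isEmpty then []
  else
    let lines := PySem.Chars.splitOn cs ['\n']
    let result := (PySem.List.slice lines none (some (-1))).map (fun line => line ++ ['\n'])
    let result :=
      match PySem.List.pyGet? lines (-1) with
      | some last => if !last.isEmpty then result ++ [last] else result
      | none => result   -- unreachable: `lines` is nonempty, so lines[-1] exists
    result.map String.ofList

-- ===== PORT B =====
-- Port of B's loop: buf is the pending line, result the emitted lines (appended at the back).
def tslScan : List Char → List Char → List (List Char) → List (List Char)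
  | [], buf, result => if buf.isEmpty then result else result ++ [buf]
  | c :: rest, buf, result =>
      let buf' := buf ++ [c]
      if c = '\n' then tslScan rest [] (result ++ [buf']) else tslScan rest buf' result

def to_source_lines_py_alt (source : String) : List String :=
  (tslScan source.toList [] []).map String.ofList

-- ===== PRECONDITION & SPEC =====
def Spec_to_source_lines_py (source : String) (out : List String) : Prop := out = to_source_lines_py_alt source
instance (source : String) (out : List String) : Decidable (Spec_to_source_lines_py source out) := by unfold Spec_to_source_lines_py; infer_instance

-- ===== CLAIM (what is proved, stated in full; the proofs are below) =====
def Claim_equal_to_source_lines_py : Prop := ∀ (source : String), Dom_to_source_lines_py source → Spec_to_source_lines_py source (to_source_lines_py source)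

-- ===== LEMMAS AND PROOFS =====

-- Reference split: pure structural version of PySem.Chars.splitOn on the separator ['\n'].
def splitRef (pre : List Char) : List Char → List (List Char)
  | [] => [pre]
  | c :: rest => if c = '\n' then pre :: splitRef [] rest else splitRef (pre ++ [c]) rest

-- Reference line list: what both programs produce, computed front-to-back.
def linesRef : List Char → List (List Char)
  | [] => []
  | c :: rest =>
      if c = '\n' then ['\n'] :: linesRef rest
      else match linesRef rest with
        | [] => [[c]]
        | t :: ts => (c :: t) :: ts

-- A's post-processing of the split parts, structurally.
def glueA : List (List Char) → List (List Char)
  | [] => []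
  | [p] => if p.isEmpty then [] else [p]
  | p :: q :: ps => (p ++ ['\n']) :: glueA (q :: ps)

-- B's scan state: a pending buffer in front of the remaining lines.
def glue (buf : List Char) : List (List Char) → List (List Char)
  | [] => if buf.isEmpty then [] else [buf]
  | t :: ts => (buf ++ t) :: ts

theorem glue_nil (L : List (List Char)) : glue [] L = L := by
  cases L <;> simp [glue]

theorem splitRef_ne_nil (pre : List Char) (l : List Char) : splitRef pre l ≠ [] := by
  induction l generalizing pre with
  | nil => simp [splitRef]
  | cons c rest ih => by_cases h : c = '\n' <;> simp [splitRef, h, ih]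

theorem splitOn_go_eq (fuel : Nat) (l cur : List Char) (acc : List (List Char))
    (h : l.length < fuel) :
    PySem.Chars.splitOn.go ['\n'] fuel l cur acc = acc.reverse ++ splitRef cur.reverse l := by
  induction fuel generalizing l cur acc with
  | zero => omega
  | succ f ih =>
    cases l with
    | nil => simp [PySem.Chars.splitOn.go, splitRef]
    | cons c rest =>
      have hrest : rest.length < f := by simpa using Nat.lt_of_succ_lt_succ h
      have hstep : PySem.Chars.splitOn.go ['\n'] (f + 1) (c :: rest) cur acc
          = if c = '\n' then PySem.Chars.splitOn.go ['\n'] f rest [] (cur.reverse :: acc)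
            else PySem.Chars.splitOn.go ['\n'] f rest (c :: cur) acc := by
        by_cases hc : c = '\n'
        · subst hc
          simp [PySem.Chars.splitOn.go, List.isPrefixOf]
        · have hc' : ¬ ('\n' = c) := fun e => hc e.symm
          simp [PySem.Chars.splitOn.go, List.isPrefixOf, hc, hc']
      rw [hstep]
      by_cases hc : c = '\n'
      · subst hc
        rw [if_pos rfl, ih rest [] (cur.reverse :: acc) hrest]
        simp [splitRef]
      · rw [if_neg hc, ih rest (c :: cur) acc hrest]
        simp [splitRef, hc]

theorem splitOn_eq (l : List Char) : PySem.Chars.splitOn l ['\n'] = splitRef [] l := by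
  rw [PySem.Chars.splitOn, splitOn_go_eq (l.length + 1) l [] [] (by omega)]
  simp

theorem slice_neg_one {α : Type} (xs : List α) :
    PySem.List.slice xs none (some (-1)) = xs.dropLast := by
  simp only [PySem.List.slice, PySem.List.clampIdx]
  rcases xs with _ | ⟨x, rest⟩
  · simp
  · have h1 : ¬ ((((x :: rest).length : Int)) + (-1) < 0) := by
      simp only [List.length_cons]; push_cast; omega
    simp only [if_pos (by norm_num : (-1 : Int) < 0), if_neg h1, List.drop_zero]
    rw [List.dropLast_eq_take]
    congr 1
    omega

theorem glueA_eq (parts : List (List Char)) (last : List Char)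
    (h : parts.getLast? = some last) :
    (parts.dropLast.map (fun line => line ++ ['\n'])) ++
      (if !last.isEmpty then [last] else []) = glueA parts := by
  induction parts with
  | nil => simp at h
  | cons p ps ih =>
    cases ps with
    | nil =>
      simp only [List.getLast?_singleton, Option.some.injEq] at h
      subst h
      cases p <;> simp [glueA]
    | cons q qs =>
      have h' : (q :: qs).getLast? = some last := by
        simpa [List.getLast?_cons_cons] using h
      simpa [glueA] using ih h'

theorem glueA_splitRef (l : List Char) (pre : List Char) :
    glueA (splitRef pre l) = glue pre (linesRef l) := by
  induction l generalizing pre with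
  | nil => cases pre <;> simp [splitRef, linesRef, glueA, glue]
  | cons c rest ih =>
    by_cases hc : c = '\n'
    · subst hc
      rw [show splitRef pre ('\n' :: rest) = pre :: splitRef [] rest from by simp [splitRef],
          show linesRef ('\n' :: rest) = ['\n'] :: linesRef rest from by simp [linesRef]]
      rcases hP : splitRef [] rest with _ | ⟨t, ts⟩
      · exact absurd hP (splitRef_ne_nil [] rest)
      · have ih0 := ih []
        rw [hP, glue_nil] at ih0
        simp only [glueA, glue, ih0]
    · rw [show splitRef pre (c :: rest) = splitRef (pre ++ [c]) rest from by simp [splitRef, hc],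
          ih (pre ++ [c]),
          show linesRef (c :: rest)
              = (match linesRef rest with | [] => [[c]] | t :: ts => (c :: t) :: ts) from by
            simp [linesRef, hc]]
      cases hL : linesRef rest with
      | nil => simp [glue]
      | cons t ts => simp [glue]

theorem tslScan_eq (l : List Char) (buf : List Char) (res : List (List Char)) :
    tslScan l buf res = res ++ glue buf (linesRef l) := by
  induction l generalizing buf res with
  | nil => cases buf <;> simp [tslScan, glue, linesRef]
  | cons c rest ih =>
    by_cases hc : c = '\n'
    · subst hc
      rw [show tslScan ('\n' :: rest) buf res = tslScan rest [] (res ++ [buf ++ ['\n']]) from by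
            simp [tslScan],
          ih, glue_nil,
          show linesRef ('\n' :: rest) = ['\n'] :: linesRef rest from by simp [linesRef]]
      simp [glue]
    · rw [show tslScan (c :: rest) buf res = tslScan rest (buf ++ [c]) res from by
            simp [tslScan, hc],
          ih,
          show linesRef (c :: rest)
              = (match linesRef rest with | [] => [[c]] | t :: ts => (c :: t) :: ts) from by
            simp [linesRef, hc]]
      cases hL : linesRef rest with
      | nil => simp [glue]
      | cons t ts => simp [glue]

-- ===== VERDICT (by name: the statement is the Claim_ definition above) =====
theorem to_source_lines_py_spec : Claim_equal_to_source_lines_py := by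
  intro source _
  unfold Spec_to_source_lines_py to_source_lines_py to_source_lines_py_alt
  rw [tslScan_eq, List.nil_append, glue_nil]
  cases hcs : source.toList with
  | nil => simp [linesRef]
  | cons c rest =>
    simp only [List.isEmpty_cons, Bool.false_eq_true, if_false]
    rw [splitOn_eq, slice_neg_one, PySem.List.pyGet?_neg_one]
    rcases hlast : (splitRef [] (c :: rest)).getLast? with _ | last
    · exact absurd (List.getLast?_eq_none_iff.mp hlast) (splitRef_ne_nil [] (c :: rest))
    · have h := glueA_eq (splitRef [] (c :: rest)) last hlast
      rw [glueA_splitRef, glue_nil] at h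
      rw [← h]
      by_cases hl : last = [] <;>
        simp [hl, List.map_append, List.map_dropLast, List.map_map]
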